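-- pv_equiv track=rewrite | github.com/LASER-UMASS/proverbot9001 | src/syntax.py | highlight_comments
-- ===== SOURCE A (Python) =====
-- comment_color = "#004800"
--
-- def highlight_comments(page : str) -> str:
--     result = ""
--     comment_depth = 0
--     for i in range(len(page)):
--         if(page[i:i+2] == "(*"):
--             comment_depth += 1
--             if comment_depth == 1:
--                 result += "<span style=\"color:{}\">".format(comment_color)
--         result += page[i]
--         if(page[i-1:i+1] == "*)"):
--             comment_depth -= 1
--             if comment_depth == 0:
--                 result += "</span>"
--     return result;
-- ===== SOURCE B (Python) =====
-- comment_color = "#004800"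
--
-- def highlight_comments(page : str) -> str:
--     # pass 1: detect where a top-level comment opens / closes
--     opens = []
--     closes = []
--     depth = 0
--     for i in range(len(page)):
--         if page[i:i+2] == "(*":
--             depth += 1
--             if depth == 1:
--                 opens.append(i)
--         if page[i-1:i+1] == "*)":
--             depth -= 1
--             if depth == 0:
--                 closes.append(i)
--     # pass 2: render
--     parts = []
--     for i, c in enumerate(page):
--         if i in opens:
--             parts.append("<span style=\"color:{}\">".format(comment_color))
--         parts.append(c)
--         if i in closes:
--             parts.append("</span>")
--     return "".join(parts)
-- ===== Notes on version B (the rewrite author's own statement) =====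
-- stated objective: alternative
-- what changed: B separates detection from rendering: a first pass records the positions where a top-level comment opens or closes, and a second pass rebuilds the page inserting the span tags at those recorded positions, instead of A's single loop that interleaves depth tracking with string building.
import Mathlib
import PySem

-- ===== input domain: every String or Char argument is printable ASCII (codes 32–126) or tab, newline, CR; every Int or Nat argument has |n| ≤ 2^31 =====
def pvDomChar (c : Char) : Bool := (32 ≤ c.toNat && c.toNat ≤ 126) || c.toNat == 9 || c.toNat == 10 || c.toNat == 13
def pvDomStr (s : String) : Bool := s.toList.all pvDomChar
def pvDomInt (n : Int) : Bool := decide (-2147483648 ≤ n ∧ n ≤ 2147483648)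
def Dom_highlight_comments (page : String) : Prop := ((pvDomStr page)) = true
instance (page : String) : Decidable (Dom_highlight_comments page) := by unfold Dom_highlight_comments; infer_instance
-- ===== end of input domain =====

-- B separates detection from rendering: pass 1 records where top-level comments open/close, pass 2 rebuilds the page from those positions (objective: alternative decomposition, same cost).

def hlOpenTag : List Char := "<span style=\"color:#004800\">".toList
def hlCloseTag : List Char := "</span>".toList

-- ===== PORT A =====
-- A's loop body: '(*' test / maybe open span; append page[i]; '*)' test / maybe close span.
def hlStepA (cs : List Char) (st : List Char × Int) (i : Int) : List Char × Int :=
  let st1 : List Char × Int :=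
    if PySem.List.slice cs (some i) (some (i+2)) = "(*".toList then
      (if st.2 + 1 = 1 then st.1 ++ hlOpenTag else st.1, st.2 + 1)
    else st
  let st2 : List Char × Int :=
    (st1.1 ++ (match PySem.List.pyGet? cs i with | some c => [c] | none => []), st1.2)
  if PySem.List.slice cs (some (i-1)) (some (i+1)) = "*)".toList then
    (if st2.2 - 1 = 0 then st2.1 ++ hlCloseTag else st2.1, st2.2 - 1)
  else st2

def highlight_comments (page : String) : String :=
  let cs := page.toList
  String.ofList ((PySem.List.pyRange 0 (PySem.Chars.len cs)).foldl (hlStepA cs) ([], 0)).1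

-- ===== PORT B =====
-- pass 1 of B: the same token tests, but it only records opening/closing positions
def hlScan (cs : List Char) (st : Int × List Int × List Int) (i : Int) : Int × List Int × List Int :=
  let st1 : Int × List Int :=
    if PySem.List.slice cs (some i) (some (i+2)) = "(*".toList then
      (st.1 + 1, if st.1 + 1 = 1 then st.2.1 ++ [i] else st.2.1)
    else (st.1, st.2.1)
  let st2 : Int × List Int :=
    if PySem.List.slice cs (some (i-1)) (some (i+1)) = "*)".toList then
      (st1.1 - 1, if st1.1 - 1 = 0 then st.2.2 ++ [i] else st.2.2)
    else (st1.1, st.2.2)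
  (st2.1, st1.2, st2.2)

-- pass 2 of B: render one character, consulting the recorded positions
def hlRenderStep (opens closes : List Int) (parts : List (List Char)) (ic : Int × Char) : List (List Char) :=
  let parts := if opens.contains ic.1 then parts ++ [hlOpenTag] else parts
  let parts := parts ++ [[ic.2]]
  if closes.contains ic.1 then parts ++ [hlCloseTag] else parts

def highlight_comments_alt (page : String) : String :=
  let cs := page.toList
  let sc := (PySem.List.pyRange 0 (PySem.Chars.len cs)).foldl (hlScan cs) (0, [], [])
  let parts := (PySem.List.enumerate cs).foldl (hlRenderStep sc.2.1 sc.2.2) []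
  String.ofList (PySem.Chars.join [] parts)

-- ===== PRECONDITION & SPEC =====
def Spec_highlight_comments (page : String) (out : String) : Prop := out = highlight_comments_alt page
instance (page : String) (out : String) : Decidable (Spec_highlight_comments page out) := by unfold Spec_highlight_comments; infer_instance

-- ===== CLAIM (what is proved, stated in full; the proofs are below) =====
def Claim_equal_highlight_comments : Prop := ∀ (page : String), Dom_highlight_comments page → Spec_highlight_comments page (highlight_comments page)

-- ===== LEMMAS AND PROOFS =====

-- the '(*' / '*)' window tests at position k
abbrev hlOpenAt (cs : List Char) (k : Nat) : Prop :=
  PySem.List.slice cs (some (Int.ofNat k)) (some (Int.ofNat k + 2)) = "(*".toList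
abbrev hlCloseAt (cs : List Char) (k : Nat) : Prop :=
  PySem.List.slice cs (some (Int.ofNat k - 1)) (some (Int.ofNat k + 1)) = "*)".toList

-- comment depth before processing index k (the trajectory shared by both loops)
def hlDepth (cs : List Char) : Nat → Int
  | 0 => 0
  | k+1 => (hlDepth cs k + (if hlOpenAt cs k then 1 else 0)) - (if hlCloseAt cs k then 1 else 0)

-- does index k emit the opening / closing span tag?
def hlEmitOpen (cs : List Char) (k : Nat) : Bool := decide (hlOpenAt cs k ∧ hlDepth cs k = 0)
def hlEmitClose (cs : List Char) (k : Nat) : Bool :=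
  decide (hlCloseAt cs k ∧ hlDepth cs k + (if hlOpenAt cs k then 1 else 0) = 1)

-- what index k contributes to the output
def hlPiece (cs : List Char) (k : Nat) : List Char :=
  (if hlEmitOpen cs k then hlOpenTag else []) ++
  (match PySem.List.pyGet? cs (Int.ofNat k) with | some c => [c] | none => []) ++
  (if hlEmitClose cs k then hlCloseTag else [])

lemma hlStepA_eq (cs : List Char) (k : Nat) (res : List Char) :
    hlStepA cs (res, hlDepth cs k) (Int.ofNat k) = (res ++ hlPiece cs k, hlDepth cs (k+1)) := by
  by_cases ho : hlOpenAt cs k <;> by_cases hc : hlCloseAt cs k <;>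
      simp only [hlStepA, hlPiece, hlDepth, hlEmitOpen, hlEmitClose, decide_eq_true_eq]
  · simp only [eq_true ho, eq_true hc, if_true, true_and]
    simp only [show (hlDepth cs k + 1 - 1 = 0) ↔ (hlDepth cs k = 0) by omega,
      show (hlDepth cs k + 1 = 1) ↔ (hlDepth cs k = 0) by omega]
    by_cases h0 : hlDepth cs k = 0 <;> simp [h0]
  · simp only [eq_true ho, eq_false hc, if_true, if_false, true_and, false_and]
    simp only [show (hlDepth cs k + 1 = 1) ↔ (hlDepth cs k = 0) by omega]
    by_cases h0 : hlDepth cs k = 0 <;> simp [h0]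
  · simp only [eq_false ho, eq_true hc, if_true, if_false, true_and, false_and, add_zero]
    simp only [show (hlDepth cs k - 1 = 0) ↔ (hlDepth cs k = 1) by omega]
    by_cases h0 : hlDepth cs k = 1 <;> simp [h0]
  · rw [if_neg ho, if_neg hc]
    simp [eq_false ho, eq_false hc]

lemma hlFoldA (cs : List Char) (m : Nat) : ∀ (k : Nat) (res : List Char),
    (((List.range' k m).map (fun (j : Nat) => Int.ofNat j)).foldl (hlStepA cs) (res, hlDepth cs k)) =
      (res ++ ((List.range' k m).map (hlPiece cs)).flatten, hlDepth cs (k+m)) := by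
  induction m with
  | zero => intro k res; simp
  | succ m ih =>
    intro k res
    rw [List.range'_succ]
    simp only [List.map_cons, List.foldl_cons, List.flatten_cons]
    rw [hlStepA_eq, ih (k+1) (res ++ hlPiece cs k)]
    have : k + 1 + m = k + (m + 1) := by omega
    rw [this, List.append_assoc]

lemma hlScan_eq (cs : List Char) (k : Nat) (ops cls : List Int) :
    hlScan cs (hlDepth cs k, ops, cls) (Int.ofNat k) =
      (hlDepth cs (k+1),
       ops ++ (if hlEmitOpen cs k then [Int.ofNat k] else []),
       cls ++ (if hlEmitClose cs k then [Int.ofNat k] else [])) := by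
  by_cases ho : hlOpenAt cs k <;> by_cases hc : hlCloseAt cs k <;>
      simp only [hlScan, hlDepth, hlEmitOpen, hlEmitClose, decide_eq_true_eq]
  · simp only [eq_true ho, eq_true hc, if_true, true_and]
    simp only [show (hlDepth cs k + 1 - 1 = 0) ↔ (hlDepth cs k = 0) by omega,
      show (hlDepth cs k + 1 = 1) ↔ (hlDepth cs k = 0) by omega]
    by_cases h0 : hlDepth cs k = 0 <;> simp [h0]
  · simp only [eq_true ho, eq_false hc, if_true, if_false, true_and, false_and]
    simp only [show (hlDepth cs k + 1 = 1) ↔ (hlDepth cs k = 0) by omega]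
    by_cases h0 : hlDepth cs k = 0 <;> simp [h0]
  · simp only [eq_false ho, eq_true hc, if_true, if_false, true_and, false_and, add_zero]
    simp only [show (hlDepth cs k - 1 = 0) ↔ (hlDepth cs k = 1) by omega]
    by_cases h0 : hlDepth cs k = 1 <;> simp [h0]
  · rw [if_neg ho, if_neg hc]
    simp [eq_false ho, eq_false hc]

lemma hlFoldScan (cs : List Char) (m : Nat) : ∀ (k : Nat) (ops cls : List Int),
    (((List.range' k m).map (fun (j : Nat) => Int.ofNat j)).foldl (hlScan cs) (hlDepth cs k, ops, cls)) =
      (hlDepth cs (k+m),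
       ops ++ ((List.range' k m).filter (fun j => hlEmitOpen cs j)).map (fun (j : Nat) => Int.ofNat j),
       cls ++ ((List.range' k m).filter (fun j => hlEmitClose cs j)).map (fun (j : Nat) => Int.ofNat j)) := by
  induction m with
  | zero => intro k ops cls; simp
  | succ m ih =>
    intro k ops cls
    rw [List.range'_succ]
    simp only [List.map_cons, List.foldl_cons, List.filter_cons]
    rw [hlScan_eq, ih (k+1)]
    have : k + 1 + m = k + (m + 1) := by omega
    rw [this]
    by_cases e1 : hlEmitOpen cs k = true <;> by_cases e2 : hlEmitClose cs k = true <;>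
      simp [e1, e2]

lemma hlRenderStep_eq (ops cls : List Int) (parts : List (List Char)) (ic : Int × Char) :
    hlRenderStep ops cls parts ic =
      parts ++ ((if ops.contains ic.1 then [hlOpenTag] else []) ++ [[ic.2]] ++
        (if cls.contains ic.1 then [hlCloseTag] else [])) := by
  simp only [hlRenderStep]
  split_ifs <;> simp

lemma hlFoldRender (ops cls : List Int) (l : List (Int × Char)) : ∀ (parts : List (List Char)),
    l.foldl (hlRenderStep ops cls) parts =
      parts ++ (l.map (fun ic =>
        (if ops.contains ic.1 then [hlOpenTag] else []) ++ [[ic.2]] ++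
        (if cls.contains ic.1 then [hlCloseTag] else []))).flatten := by
  induction l with
  | nil => intro parts; simp
  | cons ic l ih =>
    intro parts
    simp only [List.foldl_cons, List.map_cons, List.flatten_cons]
    rw [hlRenderStep_eq, ih]
    simp [List.append_assoc]

lemma hlJoinNil (l : List (List Char)) : PySem.Chars.join [] l = l.flatten := by
  induction l with
  | nil => simp [PySem.Chars.join_nil]
  | cons p rest ih =>
    cases rest with
    | nil => simp [PySem.Chars.join_singleton]
    | cons q rest' =>
      rw [PySem.Chars.join_cons_cons]
      simp only [List.flatten_cons]
      rw [ih]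
      simp

lemma hlCastFun : (fun k : Nat => (k : Int)) = (fun j : Nat => Int.ofNat j) := rfl

lemma hlMainA (page : String) :
    highlight_comments page =
      String.ofList (((List.range' 0 page.toList.length).map (hlPiece page.toList)).flatten) := by
  unfold highlight_comments
  show String.ofList ((List.foldl (hlStepA page.toList) ([], 0)
      (PySem.List.pyRange 0 (PySem.Chars.len page.toList))).1) = _
  rw [PySem.Chars.len_eq, PySem.List.pyRange_zero_natCast, List.range_eq_range', hlCastFun]
  rw [show (([] , (0:Int)) : List Char × Int) = ([], hlDepth page.toList 0) from rfl,
    hlFoldA page.toList page.toList.length 0 []]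
  simp

lemma hlMainB (page : String) :
    highlight_comments_alt page =
      String.ofList (((List.range' 0 page.toList.length).map (hlPiece page.toList)).flatten) := by
  unfold highlight_comments_alt
  show String.ofList (PySem.Chars.join []
      ((PySem.List.enumerate page.toList).foldl
        (hlRenderStep
          ((List.foldl (hlScan page.toList) (0, [], []) (PySem.List.pyRange 0 (PySem.Chars.len page.toList))).2.1)
          ((List.foldl (hlScan page.toList) (0, [], []) (PySem.List.pyRange 0 (PySem.Chars.len page.toList))).2.2))
        [])) = _
  rw [PySem.Chars.len_eq, PySem.List.pyRange_zero_natCast, List.range_eq_range', hlCastFun]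
  rw [show (((0:Int), ([]:List Int), ([]:List Int))) = (hlDepth page.toList 0, ([]:List Int), ([]:List Int)) from rfl,
    hlFoldScan page.toList page.toList.length 0 [] []]
  rw [PySem.List.enumerate_eq_map_pyRange page.toList 'A']
  rw [show PySem.List.len page.toList = ((page.toList.length : Nat) : Int) from rfl]
  rw [PySem.List.pyRange_zero_natCast, List.range_eq_range', hlCastFun, List.map_map]
  rw [hlFoldRender, hlJoinNil]
  simp only [List.nil_append, List.map_map, List.flatten_flatten]
  congr 2
  apply List.map_congr_left
  intro j hj
  have hjn : j < page.toList.length := by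
    have := (List.mem_range'_1.mp hj).2; omega
  simp only [Function.comp_apply]
  have hmo : (((List.range' 0 page.toList.length).filter (fun i => hlEmitOpen page.toList i)).map
      (fun i => Int.ofNat i)).contains (Int.ofNat j) = hlEmitOpen page.toList j := by
    by_cases h : hlEmitOpen page.toList j = true
    · simp only [h, List.contains_iff_mem, List.mem_map, List.mem_filter]
      exact ⟨j, ⟨hj, h⟩, rfl⟩
    · rw [Bool.not_eq_true] at h
      rw [h]
      refine Bool.eq_false_iff.mpr ?_
      simp only [ne_eq, List.contains_iff_mem, List.mem_map, List.mem_filter,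
        Int.ofNat.injEq, not_exists, not_and]
      rintro x ⟨hx1, hx2⟩ rfl
      simp [hx2] at h
  have hmc : (((List.range' 0 page.toList.length).filter (fun i => hlEmitClose page.toList i)).map
      (fun i => Int.ofNat i)).contains (Int.ofNat j) = hlEmitClose page.toList j := by
    by_cases h : hlEmitClose page.toList j = true
    · simp only [h, List.contains_iff_mem, List.mem_map, List.mem_filter]
      exact ⟨j, ⟨hj, h⟩, rfl⟩
    · rw [Bool.not_eq_true] at h
      rw [h]
      refine Bool.eq_false_iff.mpr ?_
      simp only [ne_eq, List.contains_iff_mem, List.mem_map, List.mem_filter,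
        Int.ofNat.injEq, not_exists, not_and]
      rintro x ⟨hx1, hx2⟩ rfl
      simp [hx2] at h
  have hjl : j < page.length := by simpa using hjn
  by_cases e1 : hlEmitOpen page.toList j = true <;> by_cases e2 : hlEmitClose page.toList j = true <;>
    simp [hlPiece, hmo, hmc, e1, e2, hjl, List.getD_eq_getElem?_getD, List.getElem?_eq_getElem hjn]

-- ===== VERDICT (by name: the statement is the Claim_ definition above) =====
theorem highlight_comments_spec : Claim_equal_highlight_comments := by
  intro page _
  unfold Spec_highlight_comments
  rw [hlMainA, hlMainB]
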